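-- pv_equiv track=rewrite | github.com/spin-spin-ryo/ZerothOrder-RSRGF | summarizing/utils.py | modify_dir_name
-- ===== SOURCE A (Python) =====
-- def modify_dir_name(dir_name,global2local = True):
--     change_names = [
--         ("reduced_dim","reduced dim"),
--         ("sample_size","sample size"),
--         ("step_schedule","step schedule")
--     ]
--     if global2local:
--         for a,b in change_names:
--             dir_name = dir_name.replace(a,b)
--         return dir_name
--     else:
--         for a,b in change_names:
--             dir_name = dir_name.replace(b,a)
--         return dir_name
-- ===== SOURCE B (Python) =====
-- def modify_dir_name(dir_name, global2local=True):
--     change_names = [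
--         ("reduced_dim", "reduced dim"),
--         ("sample_size", "sample size"),
--         ("step_schedule", "step schedule"),
--     ]
--     if global2local:
--         mapping = change_names
--     else:
--         mapping = [(b, a) for a, b in change_names]
--     out = []
--     i = 0
--     n = len(dir_name)
--     while i < n:
--         for k, v in mapping:
--             if dir_name.startswith(k, i):
--                 out.append(v)
--                 i += len(k)
--                 break
--         else:
--             out.append(dir_name[i])
--             i += 1
--     return "".join(out)
-- ===== Notes on version B (the rewrite author's own statement) =====
-- stated objective: alternative
-- what changed: Replaces the three sequential full-string str.replace passes by one fused left-to-right scan that tries the three direction-appropriate keys at each position and emits the replacement in place.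
import Mathlib
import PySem

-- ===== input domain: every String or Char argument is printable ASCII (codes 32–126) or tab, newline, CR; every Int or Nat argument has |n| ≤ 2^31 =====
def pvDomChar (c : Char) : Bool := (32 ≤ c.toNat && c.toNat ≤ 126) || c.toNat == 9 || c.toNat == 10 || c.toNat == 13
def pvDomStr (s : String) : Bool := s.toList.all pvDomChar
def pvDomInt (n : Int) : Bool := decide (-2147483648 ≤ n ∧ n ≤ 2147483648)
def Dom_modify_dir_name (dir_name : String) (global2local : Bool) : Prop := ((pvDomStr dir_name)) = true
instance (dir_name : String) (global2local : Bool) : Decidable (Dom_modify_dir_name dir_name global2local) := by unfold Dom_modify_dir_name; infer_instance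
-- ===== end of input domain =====

-- B replaces A's three sequential full-string replace passes by ONE fused left-to-right scan.

-- ===== PORT A =====
def modify_dir_name (dir_name : String) (global2local : Bool) : String :=
  let change_names : List (String × String) :=
    [("reduced_dim", "reduced dim"), ("sample_size", "sample size"), ("step_schedule", "step schedule")]
  if global2local then
    change_names.foldl (fun s p => PySem.Str.replace s p.1 p.2) dir_name
  else
    change_names.foldl (fun s p => PySem.Str.replace s p.2 p.1) dir_name

-- ===== PORT B =====
-- inner `for k, v in mapping: if dir_name.startswith(k, i)` loop of Source B
def pvFindKey : List (List Char × List Char) → List Char → Option (List Char × List Char)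
  | [], _ => none
  | (k, v) :: ms, s => if k.isPrefixOf s then some (k, v) else pvFindKey ms s

-- outer `while i < n` loop of Source B (the characters from position i on are the argument)
def pvScan (M : List (List Char × List Char)) : List Char → List Char
  | [] => []
  | c :: t =>
    match pvFindKey M (c :: t) with
    | some (k, v) => v ++ pvScan M (t.drop (k.length - 1))
    | none => c :: pvScan M t
termination_by s => s.length
decreasing_by
  · simp only [List.length_drop, List.length_cons]; omega
  · simp only [List.length_cons]; omega

def modify_dir_name_alt (dir_name : String) (global2local : Bool) : String :=
  let change_names : List (String × String) :=
    [("reduced_dim", "reduced dim"), ("sample_size", "sample size"), ("step_schedule", "step schedule")]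
  let mapping := if global2local then change_names else change_names.map (fun p => (p.2, p.1))
  String.ofList (pvScan (mapping.map (fun p => (p.1.toList, p.2.toList))) dir_name.toList)

-- ===== PRECONDITION & SPEC =====
def Spec_modify_dir_name (dir_name : String) (global2local : Bool) (out : String) : Prop := out = modify_dir_name_alt dir_name global2local
instance (dir_name : String) (global2local : Bool) (out : String) : Decidable (Spec_modify_dir_name dir_name global2local out) := by unfold Spec_modify_dir_name; infer_instance

-- ===== CLAIM (what is proved, stated in full; the proofs are below) =====
def Claim_equal_modify_dir_name : Prop := ∀ (dir_name : String) (global2local : Bool), Dom_modify_dir_name dir_name global2local → Spec_modify_dir_name dir_name global2local (modify_dir_name dir_name global2local)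

-- ===== LEMMAS AND PROOFS =====

-- single-key greedy left scan (what one str.replace pass does, structurally)
def pvRep1 (k v : List Char) : List Char → List Char
  | [] => []
  | c :: t => if k.isPrefixOf (c :: t) then v ++ pvRep1 k v (t.drop (k.length - 1)) else c :: pvRep1 k v t
termination_by s => s.length
decreasing_by
  · simp only [List.length_drop, List.length_cons]; omega
  · simp only [List.length_cons]; omega

-- every (nonempty) suffix of u is prefix-incomparable with w
def pvInert (u w : List Char) : Prop := ∀ i, i < u.length → ¬ (u.drop i <+: w) ∧ ¬ (w <+: u.drop i)

theorem pvPrefix_cases {l m z : List Char} (h : l <+: m ++ z) : l <+: m ∨ m <+: l :=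
  List.prefix_or_prefix_of_prefix h (List.prefix_append m z)

theorem pvInert_tail {c : Char} {u w : List Char} (h : pvInert (c :: u) w) : pvInert u w := by
  intro i hi
  have := h (i + 1) (by simpa using Nat.succ_lt_succ hi)
  simpa using this

theorem pvInert_not_prefix {u w z : List Char} (h : pvInert u w) (hu : u ≠ []) :
    ¬ w <+: u ++ z := by
  intro hpre
  rcases pvPrefix_cases hpre with h1 | h1
  · exact (h 0 (by cases u <;> simp_all)).2 (by simpa using h1)
  · exact (h 0 (by cases u <;> simp_all)).1 (by simpa using h1)

-- Chars.replace with nonempty old is exactly pvRep1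
theorem pvReplaceGo_eq (k v : List Char) (hk : k ≠ []) :
    ∀ fuel (l acc : List Char), l.length ≤ fuel →
      PySem.Chars.replace.go k v fuel l acc = acc.reverse ++ pvRep1 k v l := by
  intro fuel
  induction fuel with
  | zero =>
    intro l acc hl
    have : l = [] := List.eq_nil_of_length_eq_zero (Nat.le_zero.mp hl)
    subst this
    simp [PySem.Chars.replace.go, pvRep1]
  | succ n ih =>
    intro l acc hl
    match l with
    | [] => simp [PySem.Chars.replace.go, pvRep1]
    | c :: t =>
      rw [PySem.Chars.replace.go]
      by_cases hpre : k.isPrefixOf (c :: t)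
      · have hlen : (List.drop k.length (c :: t)).length ≤ n := by
          have h1 : 1 ≤ k.length := by cases k <;> simp_all
          have : (List.drop k.length (c :: t)).length = (c :: t).length - k.length := by simp
          simp only [List.length_cons] at this hl
          omega
        rw [if_pos hpre, ih _ _ hlen]
        have hdrop : List.drop k.length (c :: t) = List.drop (k.length - 1) t := by
          cases k with
          | nil => exact absurd rfl hk
          | cons a b => simp
        rw [pvRep1, if_pos hpre, hdrop]
        simp
      · have hlen : t.length ≤ n := by
          simp only [List.length_cons] at hl; omega
        rw [if_neg hpre, ih _ _ hlen, pvRep1, if_neg hpre]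
        simp

theorem pvReplace_eq (s k v : List Char) (hk : k ≠ []) :
    PySem.Chars.replace s k v = pvRep1 k v s := by
  rw [PySem.Chars.replace]
  rw [if_neg (by simpa using hk)]
  simpa using pvReplaceGo_eq k v hk s.length s [] le_rfl

-- the step equations on a matched key at the front
theorem pvRep1_step (k v Z : List Char) (hk : k ≠ []) :
    pvRep1 k v (k ++ Z) = v ++ pvRep1 k v Z := by
  match k, hk with
  | d :: ktail, _ =>
    rw [List.cons_append, pvRep1,
      if_pos (List.isPrefixOf_iff_prefix.mpr (by rw [← List.cons_append]; exact List.prefix_append _ _))]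
    rw [show (d :: ktail).length - 1 = ktail.length from by simp, List.drop_left]

theorem pvScan_step (M : List (List Char × List Char)) (k v Z : List Char) (hk : k ≠ [])
    (h : pvFindKey M (k ++ Z) = some (k, v)) : pvScan M (k ++ Z) = v ++ pvScan M Z := by
  match k, hk, h with
  | d :: ktail, _, h =>
    rw [List.cons_append, pvScan]
    rw [show pvFindKey M (d :: (ktail ++ Z)) = some (d :: ktail, v) from by
      rw [← List.cons_append]; exact h]
    simp only [List.length_cons, Nat.add_sub_cancel, List.drop_left]

-- a pvInert block passes through pvRep1 untouched
theorem pvRep1_append_inert (k v : List Char) :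
    ∀ u z, pvInert u k → pvRep1 k v (u ++ z) = u ++ pvRep1 k v z := by
  intro u
  induction u with
  | nil => intro z _; simp
  | cons c u' ih =>
    intro z h
    have hnp : ¬ k.isPrefixOf ((c :: u') ++ z) := by
      rw [List.isPrefixOf_iff_prefix]
      exact pvInert_not_prefix h (by simp)
    rw [List.cons_append, pvRep1, if_neg (by simpa using hnp)]
    have := ih z (pvInert_tail h)
    simpa using this

-- findKey characterisations
theorem pvFindKey_eq_none {M : List (List Char × List Char)} {s : List Char} :
    pvFindKey M s = none ↔ ∀ p ∈ M, ¬ p.1 <+: s := by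
  induction M with
  | nil => simp [pvFindKey]
  | cons q ms ih =>
    obtain ⟨k, v⟩ := q
    by_cases h : k.isPrefixOf s
    · simp [pvFindKey, h, List.isPrefixOf_iff_prefix.mp h]
    · rw [pvFindKey, if_neg h, ih]
      constructor
      · intro hall p hp
        rcases List.mem_cons.mp hp with rfl | hm
        · simpa [List.isPrefixOf_iff_prefix] using h
        · exact hall p hm
      · intro hall p hp
        exact hall p (List.mem_cons_of_mem _ hp)

theorem pvFindKey_some {M : List (List Char × List Char)} {s k v : List Char}
    (h : pvFindKey M s = some (k, v)) :
    ∃ M₁ M₂, M = M₁ ++ (k, v) :: M₂ ∧ (∀ p ∈ M₁, ¬ p.1 <+: s) ∧ k <+: s := by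
  induction M with
  | nil => simp [pvFindKey] at h
  | cons q ms ih =>
    obtain ⟨a, b⟩ := q
    by_cases hp : a.isPrefixOf s
    · rw [pvFindKey, if_pos hp] at h
      obtain ⟨rfl, rfl⟩ : a = k ∧ b = v := by simpa using h
      exact ⟨[], ms, by simp, by simp, List.isPrefixOf_iff_prefix.mp hp⟩
    · rw [pvFindKey, if_neg hp] at h
      obtain ⟨M₁, M₂, hM, hfail, hk⟩ := ih h
      refine ⟨(a, b) :: M₁, M₂, by simp [hM], ?_, hk⟩
      intro p hp'
      rcases List.mem_cons.mp hp' with rfl | hmem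
      · simpa [List.isPrefixOf_iff_prefix] using hp
      · exact hfail p hmem

theorem pvFindKey_append {M₁ M₂ : List (List Char × List Char)} {k v s : List Char}
    (hfail : ∀ p ∈ M₁, ¬ p.1 <+: s) (hk : k <+: s) :
    pvFindKey (M₁ ++ (k, v) :: M₂) s = some (k, v) := by
  induction M₁ with
  | nil => simp [pvFindKey, List.isPrefixOf_iff_prefix, hk]
  | cons q ms ih =>
    obtain ⟨a, b⟩ := q
    have ha : ¬ a.isPrefixOf s := by
      rw [List.isPrefixOf_iff_prefix]; exact hfail (a, b) (by simp)
    rw [List.cons_append, pvFindKey, if_neg ha]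
    exact ih (fun p hp => hfail p (List.mem_cons_of_mem _ hp))

-- a block inert for every key of M passes through pvScan untouched
theorem pvScan_append_inert (M : List (List Char × List Char)) :
    ∀ u z, (∀ p ∈ M, pvInert u p.1) → pvScan M (u ++ z) = u ++ pvScan M z := by
  intro u
  induction u with
  | nil => intro z _; simp
  | cons c u' ih =>
    intro z h
    have hnone : pvFindKey M (c :: (u' ++ z)) = none := by
      rw [pvFindKey_eq_none]
      intro p hp
      rw [← List.cons_append]
      exact pvInert_not_prefix (h p hp) (by simp)
    rw [List.cons_append, pvScan, hnone]
    have := ih z (fun p hp => pvInert_tail (h p hp))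
    simpa using this

theorem pvScan_nil : ∀ s, pvScan [] s = s := by
  intro s
  induction s with
  | nil => rw [pvScan]
  | cons c t ih => rw [pvScan]; simp [pvFindKey, ih]

-- a prefix of rep1-output that is a suffix of k' (inert with v) was already a prefix of the input
theorem pvRep1_reflect (k v k' : List Char) (hin : pvInert k' v) :
    ∀ n s w, s.length ≤ n → w <:+ k' → w <+: pvRep1 k v s → w <+: s := by
  intro n
  induction n with
  | zero =>
    intro s w hs _ hw
    have : s = [] := by cases s <;> simp_all
    subst this
    simpa [pvRep1] using hw
  | succ n ih =>
    intro s w hs hsuf hw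
    match s with
    | [] => simpa [pvRep1] using hw
    | c :: t =>
      by_cases hw0 : w = []
      · simp [hw0]
      by_cases hpre : k.isPrefixOf (c :: t)
      · rw [pvRep1, if_pos hpre] at hw
        obtain ⟨pre, hpre'⟩ := hsuf
        have hdrop : k'.drop pre.length = w := by rw [← hpre', List.drop_left]
        have hi : pre.length < k'.length := by
          have := congrArg List.length hpre'
          simp only [List.length_append] at this
          have hwpos : 0 < w.length := by cases w <;> simp_all
          omega
        rcases pvPrefix_cases hw with h1 | h1
        · exact absurd (hdrop ▸ h1) ((hin _ hi).1)
        · exact absurd (hdrop ▸ h1) ((hin _ hi).2)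
      · rw [pvRep1, if_neg hpre] at hw
        match w, hw0 with
        | d :: w', _ =>
          rw [List.cons_prefix_cons] at hw
          obtain ⟨rfl, hw'⟩ := hw
          have hsuf' : w' <:+ k' := (List.suffix_cons d w').trans hsuf
          have ht : t.length ≤ n := by simp only [List.length_cons] at hs; omega
          exact List.cons_prefix_cons.mpr ⟨rfl, ih t w' ht hsuf' hw'⟩

-- FUSION: one pass of the first key followed by scanning with the remaining keys equals
-- the fused scan, under the (decidable) no-interaction conditions on the keys/values.
theorem pvFusion (k v : List Char) (M' : List (List Char × List Char))
    (hk : k ≠ [])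
    (hkeys : ∀ p ∈ M', p.1 ≠ [])
    (hv : ∀ p ∈ M', pvInert v p.1)
    (hik : ∀ p ∈ M', pvInert p.1 k)
    (hlv : ∀ p ∈ M', pvInert p.1 v)
    (hpp : ∀ p ∈ M', ∀ q ∈ M', p.1 <+: q.1 → p.1 = q.1) :
    ∀ s, pvScan ((k, v) :: M') s = pvScan M' (pvRep1 k v s) := by
  suffices h : ∀ n s, s.length ≤ n → pvScan ((k, v) :: M') s = pvScan M' (pvRep1 k v s) from
    fun s => h s.length s le_rfl
  intro n
  induction n with
  | zero =>
    intro s hs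
    have : s = [] := by cases s <;> simp_all
    subst this
    rw [pvRep1, pvScan, pvScan]
  | succ n ih =>
    intro s hs
    match s with
    | [] => rw [pvRep1, pvScan, pvScan]
    | c :: t =>
      by_cases hpre : k.isPrefixOf (c :: t)
      · obtain ⟨Z, hZ⟩ := List.isPrefixOf_iff_prefix.mp hpre
        have hfk : pvFindKey ((k, v) :: M') (k ++ Z) = some (k, v) := by
          rw [pvFindKey, if_pos (List.isPrefixOf_iff_prefix.mpr (List.prefix_append _ _))]
        have hZlen : Z.length ≤ n := by
          have := congrArg List.length hZ
          simp only [List.length_append, List.length_cons] at this hs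
          have : 1 ≤ k.length := by cases k <;> simp_all
          omega
        rw [← hZ, pvScan_step _ _ _ _ hk hfk, pvRep1_step k v Z hk,
          pvScan_append_inert M' v _ hv, ih Z hZlen]
      · have hfk1 : pvFindKey ((k, v) :: M') (c :: t) = pvFindKey M' (c :: t) := by
          rw [pvFindKey, if_neg hpre]
        cases hfind : pvFindKey M' (c :: t) with
        | none =>
          have ht : t.length ≤ n := by simp only [List.length_cons] at hs; omega
          rw [pvScan, hfk1, hfind, pvRep1, if_neg hpre]
          have hnone2 : pvFindKey M' (c :: pvRep1 k v t) = none := by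
            rw [pvFindKey_eq_none]
            intro p hp hppre
            have hfailp := pvFindKey_eq_none.mp hfind p hp
            obtain ⟨d, w, hdw⟩ : ∃ d w, p.1 = d :: w := by
              cases hcp : p.1 with
              | nil => exact absurd hcp (hkeys p hp)
              | cons d w => exact ⟨d, w, rfl⟩
            rw [hdw, List.cons_prefix_cons] at hppre
            obtain ⟨rfl, hw⟩ := hppre
            have hws : w <:+ p.1 := hdw ▸ List.suffix_cons d w
            have hwt := pvRep1_reflect k v p.1 (hlv p hp) t.length t w le_rfl hws hw
            exact hfailp (hdw ▸ List.cons_prefix_cons.mpr ⟨rfl, hwt⟩)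
          rw [pvScan, hnone2, ih t ht]
        | some kv' =>
          obtain ⟨k', v'⟩ := kv'
          obtain ⟨M₁, M₂, hM, hfail, hk'pre⟩ := pvFindKey_some hfind
          have hmem : (k', v') ∈ M' := by rw [hM]; simp
          have hk'ne : k' ≠ [] := hkeys _ hmem
          obtain ⟨Z, hZ⟩ := hk'pre
          have hfk : pvFindKey ((k, v) :: M') (k' ++ Z) = some (k', v') := by
            rw [hZ, pvFindKey, if_neg hpre, hfind]
          have hfk2 : pvFindKey M' (k' ++ pvRep1 k v Z) = some (k', v') := by
            rw [hM]
            apply pvFindKey_append _ (List.prefix_append _ _)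
            intro p hp hppre
            have hpfail : ¬ p.1 <+: c :: t := hfail p hp
            have hk'in : k' <+: c :: t := ⟨Z, hZ⟩
            rcases pvPrefix_cases hppre with h1 | h1
            · exact hpfail (h1.trans hk'in)
            · have hpm : p ∈ M' := by rw [hM]; exact List.mem_append_left _ hp
              have heq := hpp (k', v') hmem p hpm h1
              exact hpfail (heq ▸ hk'in)
          have hZlen : Z.length ≤ n := by
            have := congrArg List.length hZ
            simp only [List.length_append, List.length_cons] at this hs
            have : 1 ≤ k'.length := by cases k' <;> simp_all
            omega
          rw [← hZ, pvScan_step _ _ _ _ hk'ne hfk,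
            pvRep1_append_inert k v k' Z (hik _ hmem),
            pvScan_step M' k' v' _ hk'ne hfk2, ih Z hZlen]

-- the two directions, assembled
theorem pv_true (dir : String) : modify_dir_name dir true = modify_dir_name_alt dir true := by
  have hA : modify_dir_name dir true =
      PySem.Str.replace (PySem.Str.replace (PySem.Str.replace dir "reduced_dim" "reduced dim")
        "sample_size" "sample size") "step_schedule" "step schedule" := rfl
  have hB : modify_dir_name_alt dir true =
      String.ofList (pvScan
        [("reduced_dim".toList, "reduced dim".toList),
         ("sample_size".toList, "sample size".toList),
         ("step_schedule".toList, "step schedule".toList)] dir.toList) := rfl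
  rw [hA, hB, PySem.Str.replace, PySem.Str.replace, PySem.Str.replace]
  simp only [String.toList_ofList]
  rw [pvReplace_eq _ _ _ (by decide), pvReplace_eq _ _ _ (by decide),
    pvReplace_eq _ _ _ (by decide)]
  rw [pvFusion "reduced_dim".toList "reduced dim".toList
    [("sample_size".toList, "sample size".toList), ("step_schedule".toList, "step schedule".toList)]
    (by decide) (by decide) (by simp only [pvInert]; decide) (by simp only [pvInert]; decide)
    (by simp only [pvInert]; decide) (by decide)]
  rw [pvFusion "sample_size".toList "sample size".toList
    [("step_schedule".toList, "step schedule".toList)]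
    (by decide) (by decide) (by simp only [pvInert]; decide) (by simp only [pvInert]; decide)
    (by simp only [pvInert]; decide) (by decide)]
  rw [pvFusion "step_schedule".toList "step schedule".toList []
    (by decide) (by decide) (by simp only [pvInert]; decide) (by simp only [pvInert]; decide)
    (by simp only [pvInert]; decide) (by decide)]
  rw [pvScan_nil]

theorem pv_false (dir : String) : modify_dir_name dir false = modify_dir_name_alt dir false := by
  have hA : modify_dir_name dir false =
      PySem.Str.replace (PySem.Str.replace (PySem.Str.replace dir "reduced dim" "reduced_dim")
        "sample size" "sample_size") "step schedule" "step_schedule" := rfl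
  have hB : modify_dir_name_alt dir false =
      String.ofList (pvScan
        [("reduced dim".toList, "reduced_dim".toList),
         ("sample size".toList, "sample_size".toList),
         ("step schedule".toList, "step_schedule".toList)] dir.toList) := rfl
  rw [hA, hB, PySem.Str.replace, PySem.Str.replace, PySem.Str.replace]
  simp only [String.toList_ofList]
  rw [pvReplace_eq _ _ _ (by decide), pvReplace_eq _ _ _ (by decide),
    pvReplace_eq _ _ _ (by decide)]
  rw [pvFusion "reduced dim".toList "reduced_dim".toList
    [("sample size".toList, "sample_size".toList), ("step schedule".toList, "step_schedule".toList)]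
    (by decide) (by decide) (by simp only [pvInert]; decide) (by simp only [pvInert]; decide)
    (by simp only [pvInert]; decide) (by decide)]
  rw [pvFusion "sample size".toList "sample_size".toList
    [("step schedule".toList, "step_schedule".toList)]
    (by decide) (by decide) (by simp only [pvInert]; decide) (by simp only [pvInert]; decide)
    (by simp only [pvInert]; decide) (by decide)]
  rw [pvFusion "step schedule".toList "step_schedule".toList []
    (by decide) (by decide) (by simp only [pvInert]; decide) (by simp only [pvInert]; decide)
    (by simp only [pvInert]; decide) (by decide)]
  rw [pvScan_nil]

-- ===== VERDICT (by name: the statement is the Claim_ definition above) =====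
theorem modify_dir_name_spec : Claim_equal_modify_dir_name := by
  intro dir g _
  unfold Spec_modify_dir_name
  cases g with
  | false => exact pv_false dir
  | true => exact pv_true dir
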